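-- pv_equiv track=rewrite | github.com/ikudjoi/advent-of-code | 2023/03/d3.py | num_ranges
-- ===== SOURCE A (Python) =====
-- def num_ranges(line):
--     res = []
--     parsing_num = False
--     start = None
--     for x, c in enumerate(line):
--         if parsing_num:
--             parsing_num = c.isdigit()
--             if not parsing_num:
--                 end = x-1
--                 res.append((start, end))
--         else:
--             parsing_num = c.isdigit()
--             if parsing_num:
--                 start = x
--     if parsing_num:
--         res.append((start, x))
--     return res
-- ===== SOURCE B (Python) =====
-- from itertools import groupby
--
--
-- def num_ranges(line):
--     res = []
--     for is_num, grp in groupby(enumerate(line), key=lambda t: t[1].isdigit()):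
--         if is_num:
--             idxs = [i for i, _ in grp]
--             res.append((idxs[0], idxs[-1]))
--     return res
-- ===== Notes on version B (the rewrite author's own statement) =====
-- stated objective: idiomatic
-- what changed: Replaced the explicit parsing_num/start boolean state machine with itertools.groupby over enumerate(line) keyed on isdigit, emitting (first,last) index of each digit run.
import Mathlib
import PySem

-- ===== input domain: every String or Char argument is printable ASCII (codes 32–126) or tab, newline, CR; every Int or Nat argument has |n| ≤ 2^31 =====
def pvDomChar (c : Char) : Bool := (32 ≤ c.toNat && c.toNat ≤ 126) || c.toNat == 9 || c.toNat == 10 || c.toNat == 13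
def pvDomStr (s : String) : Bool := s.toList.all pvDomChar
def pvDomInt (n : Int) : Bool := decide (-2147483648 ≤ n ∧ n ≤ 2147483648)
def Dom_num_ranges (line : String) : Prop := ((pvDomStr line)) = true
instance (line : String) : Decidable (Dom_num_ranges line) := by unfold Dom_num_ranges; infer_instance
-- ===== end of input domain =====

-- B replaces A's explicit parsing_num/start state machine with grouping consecutive
-- equal-isdigit runs (itertools.groupby style); objective: idiomatic, same cost.

-- ===== PORT A =====
-- state: (res, parsing_num, start, x); start and x initialised 0 standing in for
-- Python's None/unset (A only reads them after setting them, so the stand-in is never seen)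
def pvStepA (s : List (Int × Int) × Bool × Int × Int) (p : Int × Char) :
    List (Int × Int) × Bool × Int × Int :=
  let res := s.1; let parsing := s.2.1; let start := s.2.2.1
  let x := p.1; let c := p.2
  if parsing then
    if PySem.Chars.isdigit c then (res, true, start, x)
    else (res ++ [(start, x - 1)], false, start, x)
  else
    if PySem.Chars.isdigit c then (res, true, x, x)
    else (res, false, start, x)

def num_ranges (line : String) : List (Int × Int) :=
  let st := (PySem.List.enumerate line.toList 0).foldl pvStepA ([], false, 0, 0)
  if st.2.1 then st.1 ++ [(st.2.2.1, st.2.2.2)] else st.1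

-- ===== PORT B =====
-- pvRuns = itertools.groupby (consecutive runs of equal key), key = isdigit of the char
def pvRuns (ps : List (Int × Char)) : List (List (Int × Char)) :=
  match ps with
  | [] => []
  | p :: rest =>
    (p :: rest.takeWhile (fun q => PySem.Chars.isdigit q.2 == PySem.Chars.isdigit p.2))
      :: pvRuns (rest.dropWhile (fun q => PySem.Chars.isdigit q.2 == PySem.Chars.isdigit p.2))
termination_by ps.length
decreasing_by
  simp only [List.length_cons]
  exact Nat.lt_succ_of_le (List.length_dropWhile_le _ _)

def pvStepB (res : List (Int × Int)) (g : List (Int × Char)) : List (Int × Int) :=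
  match g with
  | [] => res
  | p :: rest =>
    if PySem.Chars.isdigit p.2 then
      res ++ [(p.1, (List.getLast (p :: rest) (by simp)).1)]
    else res

def num_ranges_alt (line : String) : List (Int × Int) :=
  (pvRuns (PySem.List.enumerate line.toList 0)).foldl pvStepB []

-- ===== PRECONDITION & SPEC =====
def Spec_num_ranges (line : String) (out : List (Int × Int)) : Prop := out = num_ranges_alt line
instance (line : String) (out : List (Int × Int)) : Decidable (Spec_num_ranges line out) := by unfold Spec_num_ranges; infer_instance

-- ===== CLAIM (what is proved, stated in full; the proofs are below) =====
def Claim_equal_num_ranges : Prop := ∀ (line : String), Dom_num_ranges line → Spec_num_ranges line (num_ranges line)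

-- ===== LEMMAS AND PROOFS =====

-- reference function: the digit ranges of cs with indices starting at k
def altFrom (k : Int) (cs : List Char) : List (Int × Int) :=
  match cs with
  | [] => []
  | c :: cs =>
    if PySem.Chars.isdigit c then
      ((k, k + ((cs.takeWhile PySem.Chars.isdigit).length : Int)) :
        Int × Int) :: altFrom (k + ((cs.takeWhile PySem.Chars.isdigit).length : Int) + 1)
          (cs.dropWhile PySem.Chars.isdigit)
    else altFrom (k + 1) cs
termination_by cs.length
decreasing_by
  · simp only [List.length_cons]
    exact Nat.lt_succ_of_le (List.length_dropWhile_le _ _)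
  · simp

def pvFinish (s : List (Int × Int) × Bool × Int × Int) : List (Int × Int) :=
  if s.2.1 then s.1 ++ [(s.2.2.1, s.2.2.2)] else s.1

lemma pvStepA_tt (res : List (Int × Int)) (st x k : Int) (c : Char)
    (hd : PySem.Chars.isdigit c = true) :
    pvStepA (res, true, st, x) (k, c) = (res, true, st, k) := by simp [pvStepA, hd]

lemma pvStepA_tf (res : List (Int × Int)) (st x k : Int) (c : Char)
    (hd : PySem.Chars.isdigit c = false) :
    pvStepA (res, true, st, x) (k, c) = (res ++ [(st, k - 1)], false, st, k) := by
  simp [pvStepA, hd]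

lemma pvStepA_ft (res : List (Int × Int)) (s x k : Int) (c : Char)
    (hd : PySem.Chars.isdigit c = true) :
    pvStepA (res, false, s, x) (k, c) = (res, true, k, k) := by simp [pvStepA, hd]

lemma pvStepA_ff (res : List (Int × Int)) (s x k : Int) (c : Char)
    (hd : PySem.Chars.isdigit c = false) :
    pvStepA (res, false, s, x) (k, c) = (res, false, s, k) := by simp [pvStepA, hd]

lemma pvMainA : ∀ (n : Nat) (cs : List Char), cs.length ≤ n →
    (∀ (k : Int) (res : List (Int × Int)) (s x : Int),
      pvFinish ((PySem.List.enumerate cs k).foldl pvStepA (res, false, s, x)) = res ++ altFrom k cs) ∧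
    (∀ (k : Int) (res : List (Int × Int)) (st : Int),
      pvFinish ((PySem.List.enumerate cs k).foldl pvStepA (res, true, st, k - 1)) =
        res ++ [(st, k - 1 + ((cs.takeWhile PySem.Chars.isdigit).length : Int))] ++
          altFrom (k + ((cs.takeWhile PySem.Chars.isdigit).length : Int))
            (cs.dropWhile PySem.Chars.isdigit)) := by
  intro n
  induction n with
  | zero =>
    intro cs h
    have : cs = [] := List.eq_nil_of_length_eq_zero (Nat.le_zero.mp h)
    subst this
    constructor
    · intro k res s x; simp [PySem.List.enumerate_nil, pvFinish, altFrom]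
    · intro k res st; simp [PySem.List.enumerate_nil, pvFinish, altFrom]
  | succ n ih =>
    intro cs h
    cases cs with
    | nil =>
      constructor
      · intro k res s x; simp [PySem.List.enumerate_nil, pvFinish, altFrom]
      · intro k res st; simp [PySem.List.enumerate_nil, pvFinish, altFrom]
    | cons c cs =>
      have hlen : cs.length ≤ n := by simpa using h
      have IH1 := (ih cs hlen).1
      have IH2 := (ih cs hlen).2
      constructor
      · intro k res s x
        rw [PySem.List.enumerate_cons, List.foldl_cons]
        by_cases hd : PySem.Chars.isdigit c = true
        · rw [pvStepA_ft res s x k c hd]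
          have h2 := IH2 (k + 1) res k
          rw [show k + 1 - 1 = k from by ring] at h2
          rw [h2]
          conv_rhs => rw [altFrom]
          simp only [hd, if_true]
          rw [show k + 1 + ((cs.takeWhile PySem.Chars.isdigit).length : Int) =
              k + ((cs.takeWhile PySem.Chars.isdigit).length : Int) + 1 from by ring]
          simp
        · have hd' : PySem.Chars.isdigit c = false := by simpa using hd
          rw [pvStepA_ff res s x k c hd']
          rw [IH1 (k + 1) res s k]
          conv_rhs => rw [altFrom]
          simp [hd']
      · intro k res st
        rw [PySem.List.enumerate_cons, List.foldl_cons]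
        by_cases hd : PySem.Chars.isdigit c = true
        · rw [pvStepA_tt res st (k - 1) k c hd]
          have h2 := IH2 (k + 1) res st
          rw [show k + 1 - 1 = k from by ring] at h2
          rw [h2]
          rw [List.takeWhile_cons_of_pos hd, List.dropWhile_cons_of_pos hd,
              List.length_cons]
          push_cast
          rw [show k - 1 + (((cs.takeWhile PySem.Chars.isdigit).length : Int) + 1) =
              k + ((cs.takeWhile PySem.Chars.isdigit).length : Int) from by ring,
              show k + (((cs.takeWhile PySem.Chars.isdigit).length : Int) + 1) =
              k + 1 + ((cs.takeWhile PySem.Chars.isdigit).length : Int) from by ring]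
        · have hd' : PySem.Chars.isdigit c = false := by simpa using hd
          rw [pvStepA_tf res st (k - 1) k c hd']
          rw [IH1 (k + 1) (res ++ [(st, k - 1)]) st k]
          rw [List.takeWhile_cons_of_neg (by simp [hd']),
              List.dropWhile_cons_of_neg (by simp [hd'])]
          conv_rhs => rw [altFrom]
          simp [hd', List.append_assoc]

-- takeWhile/dropWhile on an enumerate, with a predicate on the char only
lemma pvEnumTake (f : Char → Bool) : ∀ (cs : List Char) (k : Int),
    (PySem.List.enumerate cs k).takeWhile (fun q => f q.2) =
      PySem.List.enumerate (cs.takeWhile f) k := by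
  intro cs
  induction cs with
  | nil => intro k; simp [PySem.List.enumerate_nil]
  | cons c cs ih =>
    intro k
    rw [PySem.List.enumerate_cons, List.takeWhile_cons, List.takeWhile_cons]
    by_cases hf : f c
    · simp [hf, PySem.List.enumerate_cons, ih]
    · simp [hf, PySem.List.enumerate_nil]

lemma pvEnumDrop (f : Char → Bool) : ∀ (cs : List Char) (k : Int),
    (PySem.List.enumerate cs k).dropWhile (fun q => f q.2) =
      PySem.List.enumerate (cs.dropWhile f) (k + ((cs.takeWhile f).length : Int)) := by
  intro cs
  induction cs with
  | nil => intro k; simp [PySem.List.enumerate_nil]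
  | cons c cs ih =>
    intro k
    rw [PySem.List.enumerate_cons, List.dropWhile_cons]
    by_cases hf : f c
    · rw [if_pos hf, ih (k + 1), List.takeWhile_cons_of_pos hf, List.dropWhile_cons_of_pos hf, List.length_cons]
      rw [show k + ((((cs.takeWhile f).length + 1 : Nat)) : Int) =
          k + 1 + ((cs.takeWhile f).length : Int) from by push_cast; ring]
    · simp [hf, PySem.List.enumerate_cons]

lemma pvEnumGetLast : ∀ (cs : List Char) (k : Int) (c : Char)
    (h : ((k, c) :: PySem.List.enumerate cs (k + 1)) ≠ []),
    (List.getLast ((k, c) :: PySem.List.enumerate cs (k + 1)) h).1 = k + (cs.length : Int) := by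
  intro cs k c h
  have h2 : PySem.List.enumerate (c :: cs) k ≠ [] := by
    rw [PySem.List.enumerate_cons]; exact h
  have key : (List.getLast (PySem.List.enumerate (c :: cs) k) h2).1 = k + (cs.length : Int) := by
    rw [List.getLast_eq_getElem]
    simp only [PySem.List.length_enumerate, PySem.List.getElem_enumerate, List.length_cons]
    push_cast
    omega
  exact key

-- skipping a non-digit run leaves altFrom unchanged
lemma pvAltSkip : ∀ (cs : List Char) (k : Int),
    altFrom k cs =
      altFrom (k + ((cs.takeWhile (fun c => !PySem.Chars.isdigit c)).length : Int))
        (cs.dropWhile (fun c => !PySem.Chars.isdigit c)) := by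
  intro cs
  induction cs with
  | nil => intro k; simp
  | cons c cs ih =>
    intro k
    by_cases hd : PySem.Chars.isdigit c
    · simp [hd]
    · rw [List.takeWhile_cons, List.dropWhile_cons]
      simp only [hd, Bool.not_false, if_true, List.length_cons]
      rw [altFrom]
      simp only [hd]
      rw [ih (k + 1)]
      push_cast; ring_nf

lemma pvMainB : ∀ (n : Nat) (cs : List Char), cs.length ≤ n →
    ∀ (k : Int) (res : List (Int × Int)),
      (pvRuns (PySem.List.enumerate cs k)).foldl pvStepB res = res ++ altFrom k cs := by
  intro n
  induction n with
  | zero =>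
    intro cs h
    have : cs = [] := List.eq_nil_of_length_eq_zero (Nat.le_zero.mp h)
    subst this
    intro k res
    simp [PySem.List.enumerate_nil, pvRuns, altFrom]
  | succ n ih =>
    intro cs h
    cases cs with
    | nil => intro k res; simp [PySem.List.enumerate_nil, pvRuns, altFrom]
    | cons c cs =>
      have hlen : cs.length ≤ n := by simpa using h
      intro k res
      rw [PySem.List.enumerate_cons, pvRuns]
      by_cases hd : PySem.Chars.isdigit c
      · have hfun : (fun q : Int × Char => PySem.Chars.isdigit q.2 == PySem.Chars.isdigit c) =
            (fun q : Int × Char => PySem.Chars.isdigit q.2) := by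
          funext q; rw [hd]; cases PySem.Chars.isdigit q.2 <;> rfl
        simp only [hfun]
        rw [pvEnumTake PySem.Chars.isdigit cs (k + 1),
            pvEnumDrop PySem.Chars.isdigit cs (k + 1)]
        rw [List.foldl_cons]
        have hstep : pvStepB res ((k, c) ::
            PySem.List.enumerate (cs.takeWhile PySem.Chars.isdigit) (k + 1)) =
            res ++ [(k, k + ((cs.takeWhile PySem.Chars.isdigit).length : Int))] := by
          rw [pvStepB]
          simp only [hd, if_true]
          rw [pvEnumGetLast]
        rw [hstep]
        have hdw : (cs.dropWhile PySem.Chars.isdigit).length ≤ n :=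
          le_trans (List.length_dropWhile_le _ _) hlen
        rw [ih _ hdw]
        conv_rhs => rw [altFrom]
        simp only [hd, if_true]
        rw [show k + 1 + ((cs.takeWhile PySem.Chars.isdigit).length : Int) =
            k + ((cs.takeWhile PySem.Chars.isdigit).length : Int) + 1 from by ring]
        simp
      · have hfun : (fun q : Int × Char => PySem.Chars.isdigit q.2 == PySem.Chars.isdigit c) =
            (fun q : Int × Char => !PySem.Chars.isdigit q.2) := by
          funext q
          rw [show PySem.Chars.isdigit c = false from by simpa using hd]
          cases PySem.Chars.isdigit q.2 <;> rfl
        simp only [hfun]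
        rw [pvEnumTake (fun c => !PySem.Chars.isdigit c) cs (k + 1),
            pvEnumDrop (fun c => !PySem.Chars.isdigit c) cs (k + 1)]
        rw [List.foldl_cons]
        have hstep : pvStepB res ((k, c) ::
            PySem.List.enumerate (cs.takeWhile (fun c => !PySem.Chars.isdigit c)) (k + 1)) = res := by
          rw [pvStepB]; simp [hd]
        rw [hstep]
        have hdw : (cs.dropWhile (fun c => !PySem.Chars.isdigit c)).length ≤ n :=
          le_trans (List.length_dropWhile_le _ _) hlen
        rw [ih _ hdw]
        have hd' : PySem.Chars.isdigit c = false := by simpa using hd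
        rw [pvAltSkip (c :: cs) k,
            List.takeWhile_cons_of_pos (p := fun c => !PySem.Chars.isdigit c) (by simp [hd']),
            List.dropWhile_cons_of_pos (p := fun c => !PySem.Chars.isdigit c) (by simp [hd']),
            List.length_cons]
        rw [show k + ((((cs.takeWhile (fun c => !PySem.Chars.isdigit c)).length + 1 : Nat)) : Int) =
            k + 1 + ((cs.takeWhile (fun c => !PySem.Chars.isdigit c)).length : Int) from by
          push_cast; ring]

-- ===== VERDICT (by name: the statement is the Claim_ definition above) =====
theorem num_ranges_spec : Claim_equal_num_ranges := by
  intro line _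
  unfold Spec_num_ranges num_ranges num_ranges_alt
  have hA := (pvMainA line.toList.length line.toList le_rfl).1 0 [] 0 0
  have hB := pvMainB line.toList.length line.toList le_rfl 0 []
  simp only [pvFinish] at hA
  simp only [List.nil_append] at hA hB
  rw [hB, ← hA]
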